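-- pv_equiv track=rewrite | github.com/Pedr0517/project_cf_cam_calibration | drone_path.py | drone_points
-- ===== SOURCE A (Python) =====
-- def drone_points(x_dist: int, y_dist: int, z_dist: int, num_img: int) -> list:
--     """"Postions drone at top of path, moves it down through x,y,z points"""
--
--     # x_dist, bounds along x axis
--     # y_dist, bounds along y axis
--     # z_dist, bounds along z axis
--     # num_img, photos taken along path at each segment
--
--     # x_point, collection of x points along drones path
--     # y_point, collection of y points along drones path
--     # z_point, collection of z points along drones path
--
--     # List #
--     x_point = []
--     y_point = []
--     z_point = []
--
--     for h in range(1):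
--         # h == 1 refers to it coming up
--         if h == 1:
--             x_dist.reverse()
--             y_dist.reverse()
--             z_dist.reverse()
--         for i in range(3):
--             if i == 0 or i == 2:
--
--                 for j in range(num_img):
--                     x = x_dist[j]
--                     x_point.append(x)
--
--                     z = z_dist[i]
--                     z_point.append(z)
--
--                     y = y_dist[j]
--                     y_point.append(y)
--
--             if i == 1:
--                 for j in range(1, num_img + 1):
--
--                     x = x_dist[-j]
--                     x_point.append(x)
--
--                     z = z_dist[i]
--                     z_point.append(z)
--
--                     y = y_dist[-j]
--                     y_point.append(y)
--
--     return x_point, y_point, z_point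
-- ===== SOURCE B (Python) =====
-- def drone_points(x_dist: int, y_dist: int, z_dist: int, num_img: int) -> list:
--     """Builds each coordinate list by segment construction and concatenation:
--     forward pass, backward pass (last num_img elements reversed), forward pass."""
--     if num_img <= 0:
--         return [], [], []
--     fx = x_dist[:num_img]
--     bx = x_dist[len(x_dist) - num_img:][::-1]
--     fy = y_dist[:num_img]
--     by = y_dist[len(y_dist) - num_img:][::-1]
--     z0, z1, z2 = z_dist[0], z_dist[1], z_dist[2]
--     return fx + bx + fx, fy + by + fy, [z0] * num_img + [z1] * num_img + [z2] * num_img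
-- ===== Notes on version B (the rewrite author's own statement) =====
-- stated objective: simpler
-- what changed: Replaces the dead h-loop and interleaved three-branch i/j nested loops with direct construction of each coordinate list from slices (forward segment, reversed tail segment) and replicated z values, concatenated.
import Mathlib
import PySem

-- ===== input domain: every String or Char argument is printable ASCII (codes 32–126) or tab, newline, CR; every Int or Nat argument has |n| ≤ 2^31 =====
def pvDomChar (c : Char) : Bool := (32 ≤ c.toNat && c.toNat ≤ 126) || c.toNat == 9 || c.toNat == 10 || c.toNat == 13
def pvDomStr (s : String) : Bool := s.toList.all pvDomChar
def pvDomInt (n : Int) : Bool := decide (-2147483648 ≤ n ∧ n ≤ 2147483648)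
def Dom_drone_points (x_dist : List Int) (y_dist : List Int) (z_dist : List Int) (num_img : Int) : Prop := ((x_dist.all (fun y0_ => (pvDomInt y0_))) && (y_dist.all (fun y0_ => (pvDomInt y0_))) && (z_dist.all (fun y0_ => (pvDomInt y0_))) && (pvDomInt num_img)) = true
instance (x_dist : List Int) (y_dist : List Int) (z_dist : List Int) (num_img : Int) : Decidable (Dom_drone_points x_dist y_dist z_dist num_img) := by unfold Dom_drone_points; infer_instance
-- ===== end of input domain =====

-- B builds each coordinate list directly from slices/replication and concatenation instead of A's
-- interleaved nested loops with a dead h-loop; objective: simpler. Equivalence of return values on Pre_.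


-- ===== PORT A =====
-- inner j-loop for i == 0 or i == 2: appends x_dist[j], z_dist[i], y_dist[j]
def dpLoopFwd (xd yd zd : List Int) (i : Int) (js : List Int)
    (acc : List Int × List Int × List Int) : List Int × List Int × List Int :=
  js.foldl (fun acc j =>
    (acc.1 ++ [PySem.List.pyGetD xd j 0],
     acc.2.1 ++ [PySem.List.pyGetD yd j 0],
     acc.2.2 ++ [PySem.List.pyGetD zd i 0])) acc

-- inner j-loop for i == 1: appends x_dist[-j], z_dist[i], y_dist[-j]
def dpLoopBack (xd yd zd : List Int) (i : Int) (js : List Int)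
    (acc : List Int × List Int × List Int) : List Int × List Int × List Int :=
  js.foldl (fun acc j =>
    (acc.1 ++ [PySem.List.pyGetD xd (-j) 0],
     acc.2.1 ++ [PySem.List.pyGetD yd (-j) 0],
     acc.2.2 ++ [PySem.List.pyGetD zd i 0])) acc

def drone_points (x_dist : List Int) (y_dist : List Int) (z_dist : List Int) (num_img : Int) : List Int × List Int × List Int :=
  -- state: (x_dist, y_dist, z_dist, (x_point, y_point, z_point)); the h-loop runs over range(1)
  let fin := (PySem.List.pyRange 0 1 1).foldl (fun st h =>
      let dists := if h == (1 : Int) then (st.1.reverse, st.2.1.reverse, st.2.2.1.reverse)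
                   else (st.1, st.2.1, st.2.2.1)
      let pts := (PySem.List.pyRange 0 3 1).foldl (fun acc i =>
          let acc := if i == (0 : Int) || i == (2 : Int) then
              dpLoopFwd dists.1 dists.2.1 dists.2.2 i (PySem.List.pyRange 0 num_img 1) acc
            else acc
          if i == (1 : Int) then
            dpLoopBack dists.1 dists.2.1 dists.2.2 i (PySem.List.pyRange 1 (num_img + 1) 1) acc
          else acc) st.2.2.2
      (dists.1, dists.2.1, dists.2.2, pts))
    (x_dist, y_dist, z_dist, (([] : List Int), ([] : List Int), ([] : List Int)))
  fin.2.2.2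

-- ===== PORT B =====
def drone_points_alt (x_dist : List Int) (y_dist : List Int) (z_dist : List Int) (num_img : Int) : List Int × List Int × List Int :=
  if num_img ≤ 0 then ([], [], [])
  else
    let n := num_img.toNat
    let fx := PySem.List.slice x_dist none (some num_img)
    let bx := (PySem.List.slice x_dist (some ((x_dist.length : Int) - num_img)) none).reverse
    let fy := PySem.List.slice y_dist none (some num_img)
    let byy := (PySem.List.slice y_dist (some ((y_dist.length : Int) - num_img)) none).reverse
    let z0 := PySem.List.pyGetD z_dist 0 0
    let z1 := PySem.List.pyGetD z_dist 1 0
    let z2 := PySem.List.pyGetD z_dist 2 0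
    (fx ++ bx ++ fx, fy ++ byy ++ fy,
     List.replicate n z0 ++ List.replicate n z1 ++ List.replicate n z2)

-- ===== PRECONDITION & SPEC =====
-- Pre_ excludes exactly the inputs on which A raises IndexError: a positive num_img
-- exceeding the length of x_dist or y_dist, or z_dist shorter than 3.
def Pre_drone_points (x_dist : List Int) (y_dist : List Int) (z_dist : List Int) (num_img : Int) : Prop :=
  num_img ≤ 0 ∨ (num_img ≤ x_dist.length ∧ num_img ≤ y_dist.length ∧ 3 ≤ z_dist.length)
instance (x_dist : List Int) (y_dist : List Int) (z_dist : List Int) (num_img : Int) : Decidable (Pre_drone_points x_dist y_dist z_dist num_img) := by unfold Pre_drone_points; infer_instance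

def pvWitness_drone_points : List Int × List Int × List Int × Int := ([1, 2, 3], [4, 5, 6], [7, 8, 9], 2)

def Spec_drone_points (x_dist : List Int) (y_dist : List Int) (z_dist : List Int) (num_img : Int) (out : List Int × List Int × List Int) : Prop := out = drone_points_alt x_dist y_dist z_dist num_img
instance (x_dist : List Int) (y_dist : List Int) (z_dist : List Int) (num_img : Int) (out : List Int × List Int × List Int) : Decidable (Spec_drone_points x_dist y_dist z_dist num_img out) := by unfold Spec_drone_points; infer_instance

-- ===== CLAIM (what is proved, stated in full; the proofs are below) =====
def Claim_equal_drone_points : Prop := ∀ (x_dist : List Int) (y_dist : List Int) (z_dist : List Int) (num_img : Int), Dom_drone_points x_dist y_dist z_dist num_img → Pre_drone_points x_dist y_dist z_dist num_img → Spec_drone_points x_dist y_dist z_dist num_img (drone_points x_dist y_dist z_dist num_img)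

-- ===== LEMMAS AND PROOFS =====

theorem dpLoopFwd_eq (xd yd zd : List Int) (i : Int) (js : List Int)
    (xp yp zp : List Int) :
    dpLoopFwd xd yd zd i js (xp, yp, zp) =
      (xp ++ js.map (fun j => PySem.List.pyGetD xd j 0),
       yp ++ js.map (fun j => PySem.List.pyGetD yd j 0),
       zp ++ List.replicate js.length (PySem.List.pyGetD zd i 0)) := by
  induction js generalizing xp yp zp with
  | nil => simp [dpLoopFwd]
  | cons j js ih =>
    simp only [dpLoopFwd, List.foldl_cons] at *
    rw [ih]
    simp [List.replicate_succ]

theorem dpLoopBack_eq (xd yd zd : List Int) (i : Int) (js : List Int)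
    (xp yp zp : List Int) :
    dpLoopBack xd yd zd i js (xp, yp, zp) =
      (xp ++ js.map (fun j => PySem.List.pyGetD xd (-j) 0),
       yp ++ js.map (fun j => PySem.List.pyGetD yd (-j) 0),
       zp ++ List.replicate js.length (PySem.List.pyGetD zd i 0)) := by
  induction js generalizing xp yp zp with
  | nil => simp [dpLoopBack]
  | cons j js ih =>
    simp only [dpLoopBack, List.foldl_cons] at *
    rw [ih]
    simp [List.replicate_succ]

-- forward segment: [xs[j] for j in range(n)] is the first n elements when n <= len xs
theorem fwd_seg (xs : List Int) (n : Nat) (h : n <= xs.length) :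
    (PySem.List.pyRange 0 (n:Int) 1).map (fun j => PySem.List.pyGetD xs j 0) = xs.take n := by
  induction n with
  | zero => simp [PySem.List.pyRange_one_eq_nil]
  | succ m ih =>
    have hc : ((m+1 : Nat) : Int) = (m : Int) + 1 := by push_cast; ring
    rw [hc, PySem.List.pyRange_one_succ_right (by omega), List.map_append, ih (by omega)]
    have hm : m < xs.length := by omega
    have hg : PySem.List.pyGetD xs ((m : Nat) : Int) 0 = xs[m] := by
      rw [PySem.List.pyGetD_natCast]
      simp [List.getD, List.getElem?_eq_getElem hm]
    rw [List.take_add_one, List.map_cons, List.map_nil, hg,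
      List.getElem?_eq_getElem hm]
    rfl

-- backward segment: [xs[-j] for j in range(1, n+1)] is the last n elements reversed
theorem back_seg (xs : List Int) (n : Nat) (h : n <= xs.length) :
    (PySem.List.pyRange 1 ((n:Int)+1) 1).map (fun j => PySem.List.pyGetD xs (-j) 0) =
      (xs.drop (xs.length - n)).reverse := by
  induction n with
  | zero => simp [PySem.List.pyRange_one_eq_nil]
  | succ m ih =>
    have hc : ((m+1 : Nat) : Int) + 1 = ((m : Int) + 1) + 1 := by push_cast; ring
    rw [hc, PySem.List.pyRange_one_succ_right (by omega), List.map_append, ih (by omega)]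
    have hg : PySem.List.pyGetD xs (-((m:Int)+1)) 0 = xs[xs.length - (m+1)]'(by omega) := by
      have h1 : -((m:Int)+1) = -(((m+1 : Nat)) : Int) := by push_cast; ring
      rw [h1, PySem.List.pyGetD_neg_natCast xs (m+1) 0 (by omega) (by omega)]
    have hd : xs.drop (xs.length - (m+1)) =
        xs[xs.length-(m+1)]'(by omega) :: xs.drop (xs.length - (m+1) + 1) :=
      List.drop_eq_getElem_cons (by omega)
    have he : xs.length - (m+1) + 1 = xs.length - m := by omega
    rw [he] at hd
    rw [hd, List.reverse_cons, List.map_cons, List.map_nil]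
    congr 2

-- ===== VERDICT (by name: the statement is the Claim_ definition above) =====
theorem drone_points_spec : Claim_equal_drone_points := by
  intro xs ys zs num_img _ hpre
  show drone_points xs ys zs num_img = drone_points_alt xs ys zs num_img
  have hr1 : PySem.List.pyRange 0 1 1 = [0] := by decide
  have hr3 : PySem.List.pyRange 0 3 1 = [0, 1, 2] := by decide
  by_cases hle : num_img ≤ 0
  · have he1 : PySem.List.pyRange 0 num_img 1 = [] := PySem.List.pyRange_one_eq_nil hle
    have he2 : PySem.List.pyRange 1 (num_img + 1) 1 = [] :=
      PySem.List.pyRange_one_eq_nil (by omega)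
    simp [drone_points, hr1, hr3, he1, he2, dpLoopFwd, dpLoopBack, drone_points_alt, hle]
  · obtain ⟨n, rfl⟩ : ∃ n : Nat, num_img = (n : Int) := ⟨num_img.toNat, by omega⟩
    obtain ⟨hx, hy, hz⟩ := hpre.resolve_left hle
    have hxn : n ≤ xs.length := by omega
    have hyn : n ≤ ys.length := by omega
    have hlf : (PySem.List.pyRange 0 ((n:Int)) 1).length = n := by
      rw [PySem.List.length_pyRange_one]; omega
    have hlb : (PySem.List.pyRange 1 ((n:Int) + 1) 1).length = n := by
      rw [PySem.List.length_pyRange_one]; omega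
    have hz0 : PySem.List.pyGetD zs 0 0 = PySem.List.pyGetD zs (0:Int) 0 := rfl
    simp only [drone_points, hr1, hr3, List.foldl_cons, List.foldl_nil]
    norm_num
    rw [dpLoopFwd_eq, dpLoopBack_eq, dpLoopFwd_eq]
    rw [fwd_seg xs n hxn, fwd_seg ys n hyn, back_seg xs n hxn, back_seg ys n hyn,
      hlf, hlb]
    have hsx : ((xs.length : Int) - (n : Int)) = ((xs.length - n : Nat) : Int) := by
      omega
    have hsy : ((ys.length : Int) - (n : Int)) = ((ys.length - n : Nat) : Int) := by
      omega
    simp only [drone_points_alt, if_neg (show ¬ ((n:Int) ≤ 0) by omega), Int.toNat_natCast,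
      hsx, hsy, PySem.List.slice_to_natCast, PySem.List.slice_from_natCast,
      List.nil_append, List.append_assoc]
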